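-- pv_equiv track=rewrite | github.com/ibloise/FIS_opentrons_protocols | tools/FIS_opentrons_tools/distribute_tools.py | get_wells_pos
-- ===== SOURCE A (Python) =====
-- def increase_idx(idx, second_idx, lap):
--     idx += 1
--     if idx >= lap:
--         second_idx += 1
--         idx = 0
--     return (idx, second_idx)
--
-- def get_wells_pos(labware_dims, by_row = True):
--     '''
--     Crea  un diccionario de celdas con sus coordenadas según las dimensiones
--     '''
--     wells = labware_dims[0]*labware_dims[1]
--     wells_pos = {}
--     row_idx = 0
--     col_idx = 0
--     for well in range(wells):
--         wells_pos[well]= (row_idx, col_idx)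
--         if by_row:
--             row_idx, col_idx = increase_idx(row_idx, col_idx, labware_dims[0])
--         else:
--             col_idx, row_idx = increase_idx(col_idx, row_idx, labware_dims[1])
--     return wells_pos
-- ===== SOURCE B (Python) =====
-- def get_wells_pos(labware_dims, by_row = True):
--     '''
--     Crea  un diccionario de celdas con sus coordenadas según las dimensiones
--     '''
--     rows, cols = labware_dims[0], labware_dims[1]
--     wells = rows * cols
--     if by_row:
--         return {w: (w % rows, w // rows) for w in range(wells)}
--     return {w: (w // cols, w % cols) for w in range(wells)}
-- ===== Notes on version B (the rewrite author's own statement) =====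
-- stated objective: idiomatic
-- what changed: Replaced the stateful row/col counters and the increase_idx helper with a stateless dict comprehension computing each coordinate in closed form via % and //.
-- outside the precondition, e.g. on get_wells_pos((-1, -2), True): A returns {0: (0, 0), 1: (0, 1)}, B returns {0: (0, 0), 1: (0, -1)}
import Mathlib
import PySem

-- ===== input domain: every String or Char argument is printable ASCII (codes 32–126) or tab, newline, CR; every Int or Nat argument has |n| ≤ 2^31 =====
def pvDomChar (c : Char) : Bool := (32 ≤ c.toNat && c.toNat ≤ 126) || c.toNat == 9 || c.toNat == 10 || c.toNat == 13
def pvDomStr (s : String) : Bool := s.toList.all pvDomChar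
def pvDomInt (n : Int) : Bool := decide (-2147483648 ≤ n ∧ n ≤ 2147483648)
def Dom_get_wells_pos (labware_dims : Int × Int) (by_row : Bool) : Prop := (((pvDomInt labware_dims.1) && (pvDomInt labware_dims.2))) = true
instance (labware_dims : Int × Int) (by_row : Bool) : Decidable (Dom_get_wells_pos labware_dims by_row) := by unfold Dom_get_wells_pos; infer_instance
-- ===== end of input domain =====

-- B replaces A's stateful row/col counters and the increase_idx helper with a stateless
-- comprehension computing each coordinate in closed form via % and // (idiomatic; same cost).

-- ===== PORT A =====
def increase_idx (idx : Int) (second_idx : Int) (lap : Int) : Int × Int :=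
  let idx := idx + 1
  if idx ≥ lap then (0, second_idx + 1) else (idx, second_idx)

def get_wells_pos (labware_dims : Int × Int) (by_row : Bool) : List (Int × Int × Int) :=
  let wells := labware_dims.1 * labware_dims.2
  -- the dict key `well` is fresh on every iteration, so dict insertion = append
  ((PySem.List.pyRange 0 wells 1).foldl
    (fun (s : List (Int × Int × Int) × Int × Int) well =>
      let wp := s.1 ++ [(well, s.2.1, s.2.2)]
      if by_row then
        (wp, increase_idx s.2.1 s.2.2 labware_dims.1)
      else
        let p := increase_idx s.2.2 s.2.1 labware_dims.2
        (wp, p.2, p.1))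
    (([], 0, 0) : List (Int × Int × Int) × Int × Int)).1

-- ===== PORT B =====
def get_wells_pos_alt (labware_dims : Int × Int) (by_row : Bool) : List (Int × Int × Int) :=
  let rows := labware_dims.1
  let cols := labware_dims.2
  let wells := rows * cols
  if by_row then
    (PySem.List.pyRange 0 wells 1).map (fun w => (w, PySem.Int.mod w rows, PySem.Int.floordiv w rows))
  else
    (PySem.List.pyRange 0 wells 1).map (fun w => (w, PySem.Int.floordiv w cols, PySem.Int.mod w cols))

-- ===== PRECONDITION & SPEC =====
-- Pre_ excludes both-negative dimensions (outside the natural domain of labware sizes): there the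
-- well count is positive while A's wrap threshold is negative, so A's counter resets every step and
-- B's floor-division coordinates differ; A still returns a value there (see claim cites).
def Pre_get_wells_pos (labware_dims : Int × Int) (by_row : Bool) : Prop :=
  ¬ (labware_dims.1 < 0 ∧ labware_dims.2 < 0)
instance (labware_dims : Int × Int) (by_row : Bool) : Decidable (Pre_get_wells_pos labware_dims by_row) := by unfold Pre_get_wells_pos; infer_instance

def pvWitness_get_wells_pos : (Int × Int) × Bool := ((2, 3), true)

def Spec_get_wells_pos (labware_dims : Int × Int) (by_row : Bool) (out : List (Int × Int × Int)) : Prop := out = get_wells_pos_alt labware_dims by_row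
instance (labware_dims : Int × Int) (by_row : Bool) (out : List (Int × Int × Int)) : Decidable (Spec_get_wells_pos labware_dims by_row out) := by unfold Spec_get_wells_pos; infer_instance

-- ===== CLAIM (what is proved, stated in full; the proofs are below) =====
def Claim_equal_get_wells_pos : Prop := ∀ (labware_dims : Int × Int) (by_row : Bool), Dom_get_wells_pos labware_dims by_row → Pre_get_wells_pos labware_dims by_row → Spec_get_wells_pos labware_dims by_row (get_wells_pos labware_dims by_row)

-- ===== LEMMAS AND PROOFS =====

-- one wrap-around step of A's counter pair equals stepping m ↦ m+1 in the closed form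
lemma inc_closed (d : Int) (hd : 0 < d) (m : Int) :
    increase_idx (m % d) (m / d) d = ((m + 1) % d, (m + 1) / d) := by
  have hlt : m % d < d := Int.emod_lt_of_pos m hd
  have hge : 0 ≤ m % d := Int.emod_nonneg m (ne_of_gt hd)
  have hdm : d * (m / d) + m % d = m := Int.mul_ediv_add_emod m d
  unfold increase_idx
  dsimp only
  split_ifs with h
  · have hm1 : m + 1 = d * (m / d + 1) := by
      have hexp : d * (m / d + 1) = d * (m / d) + d := by ring
      have hr : m % d = d - 1 := by linarith [Int.lt_iff_add_one_le.mp hlt]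
      linarith
    rw [hm1, Int.mul_emod_right, Int.mul_ediv_cancel_left _ (ne_of_gt hd)]
  · have hsplit : m + 1 = (m % d + 1) + d * (m / d) := by linarith
    have e1 : (m + 1) % d = m % d + 1 := by
      rw [hsplit, Int.add_mul_emod_self_left, Int.emod_eq_of_lt (by linarith) (by linarith)]
    have e2 : (m + 1) / d = m / d := by
      rw [hsplit, Int.add_mul_ediv_left _ _ (ne_of_gt hd),
        Int.ediv_eq_zero_of_lt (by linarith) (by linarith), zero_add]
    rw [e1, e2]

lemma loopT (d : Int) (hd : 0 < d) (m : Int) (hm : 0 ≤ m) :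
    ((PySem.List.pyRange 0 m 1).foldl
      (fun (s : List (Int × Int × Int) × Int × Int) well =>
        (s.1 ++ [(well, s.2.1, s.2.2)], increase_idx s.2.1 s.2.2 d))
      (([], 0, 0) : List (Int × Int × Int) × Int × Int))
    = ((PySem.List.pyRange 0 m 1).map (fun w => (w, w % d, w / d)), m % d, m / d) := by
  induction m, hm using Int.le_induction with
  | base => simp [PySem.List.pyRange_one_eq_nil (le_refl 0)]
  | succ n hn ih =>
      rw [PySem.List.pyRange_one_succ_right hn, List.foldl_append, List.map_append, ih]
      simp only [List.foldl_cons, List.foldl_nil, List.map_cons, List.map_nil]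
      rw [inc_closed d hd n]

lemma loopF (d : Int) (hd : 0 < d) (m : Int) (hm : 0 ≤ m) :
    ((PySem.List.pyRange 0 m 1).foldl
      (fun (s : List (Int × Int × Int) × Int × Int) well =>
        (s.1 ++ [(well, s.2.1, s.2.2)],
          (increase_idx s.2.2 s.2.1 d).2, (increase_idx s.2.2 s.2.1 d).1))
      (([], 0, 0) : List (Int × Int × Int) × Int × Int))
    = ((PySem.List.pyRange 0 m 1).map (fun w => (w, w / d, w % d)), m / d, m % d) := by
  induction m, hm using Int.le_induction with
  | base => simp [PySem.List.pyRange_one_eq_nil (le_refl 0)]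
  | succ n hn ih =>
      rw [PySem.List.pyRange_one_succ_right hn, List.foldl_append, List.map_append, ih]
      simp only [List.foldl_cons, List.foldl_nil, List.map_cons, List.map_nil]
      rw [inc_closed d hd n]

-- ===== VERDICT (by name: the statement is the Claim_ definition above) =====
theorem get_wells_pos_spec : Claim_equal_get_wells_pos := by
  intro ld br hdom hpre
  unfold Spec_get_wells_pos get_wells_pos get_wells_pos_alt
  obtain ⟨d0, d1⟩ := ld
  dsimp only
  by_cases hn : d0 * d1 ≤ 0
  · rw [PySem.List.pyRange_one_eq_nil hn]
    cases br <;> simp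
  · rw [not_le] at hn
    unfold Pre_get_wells_pos at hpre
    have hpos : 0 < d0 ∧ 0 < d1 := by
      rcases Int.mul_pos_iff.mp hn with ⟨h, h'⟩ | ⟨h, h'⟩
      · exact ⟨h, h'⟩
      · exact absurd ⟨h, h'⟩ hpre
    cases br
    · simp only [Bool.false_eq_true, if_false]
      rw [loopF d1 hpos.2 (d0 * d1) (le_of_lt hn)]
      refine List.map_congr_left (fun w hw => ?_)
      have hw0 : 0 ≤ w := (PySem.List.mem_pyRange_one.mp hw).1
      rw [PySem.Int.mod_eq_emod_of_pos hpos.2, PySem.Int.floordiv_eq_ediv_of_pos hpos.2]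
    · simp only [if_true]
      rw [loopT d0 hpos.1 (d0 * d1) (le_of_lt hn)]
      refine List.map_congr_left (fun w hw => ?_)
      have hw0 : 0 ≤ w := (PySem.List.mem_pyRange_one.mp hw).1
      rw [PySem.Int.mod_eq_emod_of_pos hpos.1, PySem.Int.floordiv_eq_ediv_of_pos hpos.1]
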